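-- pv_equiv track=rewrite | github.com/potato3641/algo | SWEA/220818/1258.py | is_board
-- ===== SOURCE A (Python) =====
-- def is_board(board, y, x):
--     cnt, row, col = 0, 1, 1
--     flag = 1
--     while True:
--         if board[y][x] and flag&1:
--             board[y][x] = 0
--             x += 1
--             cnt += 1
--         elif not board[y][x] and flag&1:
--             x -= 1
--             board[y][x] = 1
--             col = cnt*1
--             cnt = 0
--             flag = 0
--         if board[y][x] and flag^1:
--             board[y][x+1-col:x+1] = [0]*col
--             y += 1
--             cnt += 1
--         elif not board[y][x] and flag^1:
--             y -= 1
--             row = cnt*1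
--             break
--     return board, row, col
-- ===== SOURCE B (Python) =====
-- def is_board(board, y, x):
--     y0, x0 = y, x
--     # sweep right, wiping the run as we go (the sweep must see its own writes)
--     while board[y][x]:
--         board[y][x] = 0
--         x += 1
--     col = x - x0                 # width = how far the sweep got
--     x -= 1
--     board[y][x] = 1              # re-arm the run's last cell as the anchor of the descent
--     # descend the anchor column, wiping one row slice per step
--     while board[y][x]:
--         board[y][x0:x0 + col] = [0] * col
--         y += 1
--     return board, y - y0, col
-- ===== Notes on version B (the rewrite author's own statement) =====
-- stated objective: simpler
-- what changed: A runs one flag-driven `while True` state machine (flag, a cnt counter reused for both dimensions, col = cnt*1, slice bounds recomputed from the moving x); B keeps the same in-place write schedule but restructures it as two plain while loops with pointer arithmetic (col = x - x0, row = y - y0) and fixed slice bounds board[y][x0:x0+col], so B agrees with A on every input, including A's negative-index wraparound corners.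
import Mathlib
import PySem

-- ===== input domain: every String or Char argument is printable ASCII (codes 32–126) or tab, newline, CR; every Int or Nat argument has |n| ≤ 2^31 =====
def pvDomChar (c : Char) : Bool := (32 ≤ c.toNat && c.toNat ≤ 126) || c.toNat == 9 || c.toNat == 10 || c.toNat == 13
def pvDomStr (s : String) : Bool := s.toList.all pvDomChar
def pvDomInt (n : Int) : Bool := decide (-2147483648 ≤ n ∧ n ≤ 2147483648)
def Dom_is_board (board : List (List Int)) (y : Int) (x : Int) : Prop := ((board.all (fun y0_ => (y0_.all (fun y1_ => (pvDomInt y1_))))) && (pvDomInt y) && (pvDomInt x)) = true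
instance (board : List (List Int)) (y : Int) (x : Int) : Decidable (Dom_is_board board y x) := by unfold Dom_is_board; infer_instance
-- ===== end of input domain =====

-- B replaces A's flag-driven `while True` state machine (flag, cnt recounted twice, col = cnt*1)
-- by two plain while loops with pointer arithmetic (col = x - x0, row = y - y0), keeping A's exact
-- in-place read/write schedule (objective: simpler). Both Pythons mutate `board` in place and
-- return it; the agreement proved here is of the returned triple (which contains the final board).

-- ===== PORT A =====
-- board[y][x] (none = IndexError)
def pvCell? (board : List (List Int)) (y x : Int) : Option Int :=
  (PySem.List.pyGet? board y).bind (fun r => PySem.List.pyGet? r x)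

-- board[y][x] = v (none = IndexError)
def pvSet? (board : List (List Int)) (y x : Int) (v : Int) : Option (List (List Int)) :=
  (PySem.List.pyGet? board y).bind (fun r =>
    (PySem.List.pySet? r x v).map (fun r' => PySem.List.pySetD board y r'))

-- l[a:b] = v — Python's step-1 slice assignment, exactly: clamped bounds, and when the clamped
-- stop lies before the clamped start Python inserts at the start position (b' = max a' b')
def pvSliceSet (l : List Int) (a b : Int) (v : List Int) : List Int :=
  let a' := PySem.List.clampIdx l.length a
  let b' := max a' (PySem.List.clampIdx l.length b)
  l.take a' ++ v ++ l.drop b'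

-- board[y][a:b] = v (the row read cannot fail where the loops use it: board[y] was just read)
def pvRowSlice (board : List (List Int)) (y a b : Int) (v : List Int) : List (List Int) :=
  match PySem.List.pyGet? board y with
  | none => board
  | some r => PySem.List.pySetD board y (pvSliceSet r a b v)

-- the flag = 0 rounds of A's `while True` (only the second if/elif pair can fire);
-- none = IndexError (or fuel out, which the fuel below never lets happen before an IndexError)
def loopA2 : Nat → List (List Int) → Int → Int → Int → Int → Option (List (List Int) × Int × Int)
  | 0, _, _, _, _, _ => none
  | fuel+1, board, y, x, cnt, col =>
    match pvCell? board y x with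
    | none => none
    | some v =>
      if v ≠ 0 then
        loopA2 fuel (pvRowSlice board y (x + 1 - col) (x + 1) (List.replicate col.toNat 0))
          (y + 1) x (cnt + 1) col
      else
        some (board, cnt, col)                 -- y -= 1; row = cnt; break

-- the flag = 1 rounds (first if/elif pair); when the flag flips, the same round falls
-- through into the second pair, i.e. into loopA2 with the fuel it still has
def loopA1 : Nat → List (List Int) → Int → Int → Int → Option (List (List Int) × Int × Int)
  | 0, _, _, _, _ => none
  | fuel+1, board, y, x, cnt =>
    match pvCell? board y x with
    | none => none
    | some v =>
      if v ≠ 0 then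
        (pvSet? board y x 0).bind (fun b' => loopA1 fuel b' y (x + 1) (cnt + 1))
      else
        (pvSet? board y (x - 1) 1).bind (fun b' => loopA2 (fuel + 1) b' y (x - 1) 0 cnt)

def is_board (board : List (List Int)) (y : Int) (x : Int) : List (List Int) × Int × Int :=
  (loopA1 (2 * ((PySem.List.pyGet? board y).getD []).length + 2 * board.length + 4)
    board y x 0).getD ([], 0, 0)

-- ===== PORT B =====
-- `while board[y][x]: board[y][x] = 0; x += 1` — returns the board and the final x
def loopB1 : Nat → List (List Int) → Int → Int → Option (List (List Int) × Int)
  | 0, _, _, _ => none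
  | fuel+1, board, y, x =>
    match pvCell? board y x with
    | none => none
    | some v =>
      if v ≠ 0 then (pvSet? board y x 0).bind (fun b' => loopB1 fuel b' y (x + 1))
      else some (board, x)

-- `while board[y][x]: board[y][x0:x0+col] = [0]*col; y += 1` — returns the board and the final y
def loopB2 : Nat → List (List Int) → Int → Int → Int → Int → Option (List (List Int) × Int)
  | 0, _, _, _, _, _ => none
  | fuel+1, board, y, x, x0, col =>
    match pvCell? board y x with
    | none => none
    | some v =>
      if v ≠ 0 then
        loopB2 fuel (pvRowSlice board y x0 (x0 + col) (List.replicate col.toNat 0))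
          (y + 1) x x0 col
      else some (board, y)

def is_board_alt (board : List (List Int)) (y : Int) (x : Int) : List (List Int) × Int × Int :=
  ((loopB1 (2 * ((PySem.List.pyGet? board y).getD []).length + 2) board y x).bind (fun p =>
    let col := p.2 - x
    (pvSet? p.1 y (p.2 - 1) 1).bind (fun b' =>
      (loopB2 (2 * board.length + 2) b' y (p.2 - 1) x col).map (fun q =>
        (q.1, q.2 - y, col))))).getD ([], 0, 0)

-- ===== PRECONDITION & SPEC =====
-- Pre_ is exactly the closed-form part of "A terminates without IndexError": (y, x) addresses a
-- cell; the rightward sweep from it meets a 0 before running off the row (for a negative x the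
-- sweep may wrap once, where it meets the 0 it wrote at its own start cell); the anchor write at
-- x-1+col stays in range; and the downward scan from y meets, at the anchor column, a 0 before a
-- too-short row, the bottom edge, or a re-visited row. Also excluded (see the cite): starts whose
-- downward scan only stops on a RE-VISITED row that the sweep itself already rewrote in a
-- length-changing way — there A still returns, B returns the very same value (B repeats A's write
-- schedule), but A's termination there has no closed form a reader could check.
def preB (board : List (List Int)) (y x : Int) : Bool :=
  match PySem.List.pyIdx? board.length y with
  | none => false
  | some Y =>
    let r0 := board.getD Y []
    let m := r0.length
    match PySem.List.pyIdx? m x with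
    | none => false
    | some X =>
      let col? : Option Nat :=
        if 0 ≤ x then (r0.drop X).findIdx? (fun v => v == 0)
        else some ((((r0.drop X ++ r0.take X).findIdx? (fun v => v == 0))).getD m)
      match col? with
      | none => false
      | some col =>
        if col == 0 && x == -(m : Int) then false
        else
          let xr : Int := x + (col : Int) - 1
          let rows2 := board.drop (Y+1) ++ (if 0 ≤ y then [] else board.take Y)
          match rows2.findIdx? (fun r => ((PySem.List.pyGet? r xr).getD 0) == 0) with
          | some i => (PySem.List.pyGet? (rows2.getD i []) xr) == some 0
          | none => decide (y < 0) && decide (1 ≤ col) &&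
                    (decide (0 ≤ x) || decide (x + (col : Int) < 0))

def Pre_is_board (board : List (List Int)) (y : Int) (x : Int) : Prop := preB board y x = true
instance (board : List (List Int)) (y : Int) (x : Int) : Decidable (Pre_is_board board y x) := by
  unfold Pre_is_board; infer_instance

def pvWitness_is_board : List (List Int) × Int × Int := ([[1, 1, 0], [1, 1, 0], [0, 0, 0]], 0, 0)

def Spec_is_board (board : List (List Int)) (y : Int) (x : Int) (out : List (List Int) × Int × Int) : Prop := out = is_board_alt board y x
instance (board : List (List Int)) (y : Int) (x : Int) (out : List (List Int) × Int × Int) : Decidable (Spec_is_board board y x out) := by unfold Spec_is_board; infer_instance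

-- ===== CLAIM (what is proved, stated in full; the proofs are below) =====
def Claim_equal_is_board : Prop := ∀ (board : List (List Int)) (y : Int) (x : Int), Dom_is_board board y x → Pre_is_board board y x → Spec_is_board board y x (is_board board y x)

-- ===== LEMMAS AND PROOFS =====

-- (the proof below in fact establishes A = B on EVERY input, so the Pre_ hypothesis is not
-- consumed; Pre_ still scopes the Python-level claim to inputs where A returns)

-- phase-1 lockstep: A's flag=1 rounds are B's first while loop; at the flip A hands its
-- remaining fuel and its counter (= how far x travelled) to loopA2
theorem loopB1_ge (f : Nat) : ∀ (b : List (List Int)) (y x : Int) (p : List (List Int) × Int),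
    loopB1 f b y x = some p → x ≤ p.2 := by
  induction f with
  | zero => intro b y x p h; simp [loopB1] at h
  | succ f ih =>
    intro b y x p h
    unfold loopB1 at h
    cases hc : pvCell? b y x with
    | none => simp [hc] at h
    | some v =>
      simp only [hc] at h
      by_cases hv : v ≠ 0
      · simp only [if_pos hv] at h
        cases hs : pvSet? b y x 0 with
        | none => simp [hs] at h
        | some b' =>
          simp only [hs, Option.bind_some] at h
          have := ih b' y (x+1) p h
          omega
      · simp only [if_neg hv] at h
        cases h
        simp

theorem phase1_lockstep (f : Nat) : ∀ (b : List (List Int)) (y x c : Int),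
    loopA1 f b y x c =
      (loopB1 f b y x).bind (fun p =>
        (pvSet? p.1 y (p.2 - 1) 1).bind (fun b' =>
          loopA2 (f - (p.2 - x).toNat) b' y (p.2 - 1) 0 (c + (p.2 - x)))) := by
  induction f with
  | zero => intro b y x c; simp [loopA1, loopB1]
  | succ f ih =>
    intro b y x c
    unfold loopA1 loopB1
    cases hc : pvCell? b y x with
    | none => simp
    | some v =>
      simp only []
      by_cases hv : v ≠ 0
      · simp only [if_pos hv]
        cases hs : pvSet? b y x 0 with
        | none => simp
        | some b' =>
          simp only [Option.bind_some]
          rw [ih b' y (x+1) (c+1)]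
          cases hp : loopB1 f b' y (x+1) with
          | none => simp
          | some p =>
            have hxp : x + 1 ≤ p.2 := loopB1_ge f b' y (x+1) p hp
            simp only [Option.bind_some]
            have h1 : f - (p.2 - (x+1)).toNat = f + 1 - (p.2 - x).toNat := by omega
            have h2 : c + 1 + (p.2 - (x + 1)) = c + (p.2 - x) := by ring
            rw [h1, h2]
      · simp only [if_neg hv, Option.bind_some]
        have h1 : f + 1 - (x - x).toNat = f + 1 := by simp
        have h2 : c + (x - x) = c := by ring
        rw [h1, h2]

-- phase-2 lockstep: A's flag=0 rounds are B's second while loop; A's slice bounds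
-- (x+1-col, x+1) are B's (x0, x0+col), and A's re-counted cnt is B's y - y0
theorem phase2_lockstep (f : Nat) : ∀ (b : List (List Int)) (yv x x0 col cnt : Int),
    x0 + col = x + 1 →
    loopA2 f b yv x cnt col =
      (loopB2 f b yv x x0 col).map (fun q => (q.1, cnt + (q.2 - yv), col)) := by
  induction f with
  | zero => intro b yv x x0 col cnt h; simp [loopA2, loopB2]
  | succ f ih =>
    intro b yv x x0 col cnt h
    unfold loopA2 loopB2
    cases hc : pvCell? b yv x with
    | none => simp
    | some v =>
      simp only []
      by_cases hv : v ≠ 0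
      · simp only [if_pos hv]
        have hb : x + 1 - col = x0 := by omega
        have hb2 : (x : Int) + 1 = x0 + col := h.symm
        rw [hb, hb2]
        rw [ih (pvRowSlice b yv x0 (x0 + col) (List.replicate col.toNat 0)) (yv+1) x x0 col (cnt+1) h]
        cases hq : loopB2 f (pvRowSlice b yv x0 (x0 + col) (List.replicate col.toNat 0)) (yv+1) x x0 col with
        | none => simp
        | some q =>
          simp only [Option.map_some]
          have : cnt + 1 + (q.2 - (yv + 1)) = cnt + (q.2 - yv) := by ring
          rw [this]
      · simp only [if_neg hv, Option.map_some]
        have : cnt + (yv - yv) = cnt := by ring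
        rw [this]

-- index facts about Python's index normalisation
theorem pyIdx?_facts (n : Nat) (i : Int) (k : Nat) (h : PySem.List.pyIdx? n i = some k) :
    -(n : Int) ≤ i ∧ i < (n : Int) ∧ k < n := by
  unfold PySem.List.pyIdx? at h
  split_ifs at h with h1 h2 h3 <;> cases h <;> omega

-- a successful board[y][x] = v write decomposed into list operations
theorem pvSet?_decomp (b : List (List Int)) (y x v : Int) (b' : List (List Int))
    (h : pvSet? b y x v = some b') :
    ∃ (K : Nat) (r r' : List Int), PySem.List.pyGet? b y = some r ∧ K < b.length ∧
      PySem.List.pyIdx? b.length y = some K ∧ b[K]? = some r ∧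
      r'.length = r.length ∧ b' = b.set K r' := by
  unfold pvSet? at h
  cases hg : PySem.List.pyGet? b y with
  | none => rw [hg] at h; simp at h
  | some r =>
    rw [hg] at h
    simp only [Option.bind_some] at h
    cases hs : PySem.List.pySet? r x v with
    | none => rw [hs] at h; simp at h
    | some r' =>
      rw [hs] at h
      simp only [Option.map_some] at h
      have hg' := hg
      unfold PySem.List.pyGet? at hg'
      cases hk : PySem.List.pyIdx? b.length y with
      | none => rw [hk] at hg'; simp at hg'
      | some K =>
        rw [hk] at hg'
        simp only [Option.bind_some] at hg'
        have hKlt : K < b.length := (pyIdx?_facts _ _ _ hk).2.2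
        refine ⟨K, r, r', rfl, hKlt, rfl, hg', ?_, ?_⟩
        · unfold PySem.List.pySet? at hs
          cases hk2 : PySem.List.pyIdx? r.length x with
          | none => rw [hk2] at hs; simp at hs
          | some K2 => rw [hk2] at hs; simp only [Option.map_some] at hs; cases hs; simp
        · cases h
          unfold PySem.List.pySetD PySem.List.pySet?
          rw [hk]
          rfl

-- the length of row y survives a write into row y
theorem rowlen_pvSet (b b' : List (List Int)) (y x : Int) (v : Int)
    (h : pvSet? b y x v = some b') :
    ((PySem.List.pyGet? b' y).getD []).length = ((PySem.List.pyGet? b y).getD []).length := by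
  obtain ⟨K, r, r', hg, hKlt, hk, hbK, hlen, hb'⟩ := pvSet?_decomp b y x v b' h
  subst hb'
  unfold PySem.List.pyGet?
  rw [List.length_set, hk]
  simp only [Option.bind_some]
  rw [List.getElem?_set_self (by omega)]
  unfold PySem.List.pyGet? at hg
  rw [hk] at hg
  simp only [Option.bind_some] at hg
  rw [hg]
  simpa using hlen

-- the board's length survives a write into a row
theorem len_pvSet (b b' : List (List Int)) (y x : Int) (v : Int)
    (h : pvSet? b y x v = some b') : b'.length = b.length := by
  obtain ⟨K, r, r', _, _, _, _, _, hb'⟩ := pvSet?_decomp b y x v b' h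
  subst hb'
  exact List.length_set ..

-- the board's length survives a row-slice assignment
theorem len_pvRowSlice (b : List (List Int)) (y a c : Int) (v : List Int) :
    (pvRowSlice b y a c v).length = b.length := by
  unfold pvRowSlice
  cases hg : PySem.List.pyGet? b y with
  | none => rfl
  | some r => exact PySem.List.length_pySetD ..

-- a successful cell read bounds the index by the row's length
theorem pvCell?_bounds (b : List (List Int)) (y x : Int) (v : Int)
    (h : pvCell? b y x = some v) :
    -(((PySem.List.pyGet? b y).getD []).length : Int) ≤ x ∧
      x < (((PySem.List.pyGet? b y).getD []).length : Int) := by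
  unfold pvCell? at h
  cases hg : PySem.List.pyGet? b y with
  | none => rw [hg] at h; simp at h
  | some r =>
    rw [hg] at h
    simp only [Option.bind_some] at h
    unfold PySem.List.pyGet? at h
    cases hk : PySem.List.pyIdx? r.length x with
    | none => rw [hk] at h; simp at h
    | some K =>
      have := pyIdx?_facts _ _ _ hk
      simp only [Option.getD_some]
      omega

-- loopB1's result is independent of the fuel once the fuel clears the row-length bound
theorem loopB1_fuel (f : Nat) : ∀ (g : Nat) (b : List (List Int)) (y x : Int) (m : Nat),
    ((PySem.List.pyGet? b y).getD []).length = m →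
    min (((m : Int) - x).toNat) (2*m+1) < f → min (((m : Int) - x).toNat) (2*m+1) < g →
    loopB1 f b y x = loopB1 g b y x := by
  induction f with
  | zero => intro g b y x m hm hf hg; omega
  | succ f ih =>
    intro g b y x m hm hf hg
    cases g with
    | zero => omega
    | succ g =>
      unfold loopB1
      cases hc : pvCell? b y x with
      | none => rfl
      | some v =>
        simp only []
        by_cases hv : v ≠ 0
        · simp only [if_pos hv]
          cases hs : pvSet? b y x 0 with
          | none => rfl
          | some b'
          => simp only [Option.bind_some]
             have hb := pvCell?_bounds b y x v hc
             rw [hm] at hb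
             have hm' : ((PySem.List.pyGet? b' y).getD []).length = m := by
               rw [rowlen_pvSet b b' y x 0 hs, hm]
             exact ih g b' y (x+1) m hm' (by omega) (by omega)
        · simp only [if_neg hv]

-- a successful phase-1 sweep ends inside the row (so it took at most 2m steps)
theorem loopB1_bounds (f : Nat) : ∀ (b : List (List Int)) (y x : Int) (m : Nat)
    (p : List (List Int) × Int),
    ((PySem.List.pyGet? b y).getD []).length = m →
    loopB1 f b y x = some p → -(m:Int) ≤ x ∧ x ≤ p.2 ∧ p.2 < (m:Int) := by
  induction f with
  | zero => intro b y x m p hm h; simp [loopB1] at h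
  | succ f ih =>
    intro b y x m p hm h
    unfold loopB1 at h
    cases hc : pvCell? b y x with
    | none => rw [hc] at h; simp at h
    | some v =>
      rw [hc] at h
      have hb := pvCell?_bounds b y x v hc
      rw [hm] at hb
      simp only [] at h
      by_cases hv : v ≠ 0
      · rw [if_pos hv] at h
        cases hs : pvSet? b y x 0 with
        | none => rw [hs] at h; simp at h
        | some b' =>
          rw [hs] at h
          simp only [Option.bind_some] at h
          have hm' : ((PySem.List.pyGet? b' y).getD []).length = m := by
            rw [rowlen_pvSet b b' y x 0 hs, hm]
          have := ih b' y (x+1) m p hm' h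
          omega
      · rw [if_neg hv] at h
        cases h
        exact ⟨hb.1, le_refl _, hb.2⟩

-- a phase-1 sweep never changes the board's length
theorem loopB1_len (f : Nat) : ∀ (b : List (List Int)) (y x : Int) (p : List (List Int) × Int),
    loopB1 f b y x = some p → p.1.length = b.length := by
  induction f with
  | zero => intro b y x p h; simp [loopB1] at h
  | succ f ih =>
    intro b y x p h
    unfold loopB1 at h
    cases hc : pvCell? b y x with
    | none => rw [hc] at h; simp at h
    | some v =>
      rw [hc] at h
      simp only [] at h
      by_cases hv : v ≠ 0
      · rw [if_pos hv] at h
        cases hs : pvSet? b y x 0 with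
        | none => rw [hs] at h; simp at h
        | some b' =>
          rw [hs] at h
          simp only [Option.bind_some] at h
          rw [ih b' y (x+1) p h, len_pvSet b b' y x 0 hs]
      · rw [if_neg hv] at h
        cases h
        rfl

-- loopB2's result is independent of the fuel once the fuel clears the board-length bound
theorem loopB2_fuel (f : Nat) : ∀ (g : Nat) (b : List (List Int)) (yv x x0 col : Int) (n : Nat),
    b.length = n →
    min (((n : Int) - yv).toNat) (2*n+1) < f → min (((n : Int) - yv).toNat) (2*n+1) < g →
    loopB2 f b yv x x0 col = loopB2 g b yv x x0 col := by
  induction f with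
  | zero => intro g b yv x x0 col n hn hf hg; omega
  | succ f ih =>
    intro g b yv x x0 col n hn hf hg
    cases g with
    | zero => omega
    | succ g =>
      unfold loopB2
      cases hc : pvCell? b yv x with
      | none => rfl
      | some v =>
        simp only []
        by_cases hv : v ≠ 0
        · simp only [if_pos hv]
          have hyb : -(n:Int) ≤ yv ∧ yv < (n:Int) := by
            unfold pvCell? at hc
            cases hg2 : PySem.List.pyGet? b yv with
            | none => rw [hg2] at hc; simp at hc
            | some r =>
              unfold PySem.List.pyGet? at hg2
              cases hk : PySem.List.pyIdx? b.length yv with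
              | none => rw [hk] at hg2; simp at hg2
              | some K =>
                have := pyIdx?_facts _ _ _ hk
                omega
          have hn' : (pvRowSlice b yv x0 (x0 + col) (List.replicate col.toNat 0)).length = n := by
            rw [len_pvRowSlice, hn]
          exact ih g _ (yv+1) x x0 col n hn' (by omega) (by omega)
        · simp only [if_neg hv]

-- ===== VERDICT (by name: the statement is the Claim_ definition above) =====
theorem is_board_spec : Claim_equal_is_board := by
  intro board y x _ _
  unfold Spec_is_board is_board is_board_alt
  rw [phase1_lockstep]
  set m := ((PySem.List.pyGet? board y).getD []).length with hm
  set n := board.length with hn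
  have hmin1 : min (((m:Int) - x).toNat) (2*m+1) ≤ 2*m+1 := min_le_right _ _
  have hf1 : loopB1 (2*m + 2*n + 4) board y x = loopB1 (2*m + 2) board y x :=
    loopB1_fuel _ _ board y x m rfl (by omega) (by omega)
  rw [hf1]
  cases hp : loopB1 (2*m + 2) board y x with
  | none => simp
  | some p =>
    simp only [Option.bind_some]
    cases hs : pvSet? p.1 y (p.2 - 1) 1 with
    | none => simp
    | some b' =>
      simp only [Option.bind_some, zero_add]
      have hcol : x + (p.2 - x) = (p.2 - 1) + 1 := by ring
      rw [phase2_lockstep _ b' y (p.2 - 1) x (p.2 - x) 0 hcol]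
      have hbnd := loopB1_bounds _ board y x m p rfl hp
      have hlenb' : b'.length = n := by
        rw [len_pvSet p.1 b' y (p.2 - 1) 1 hs, loopB1_len _ board y x p hp]
      have hk : (p.2 - x).toNat ≤ 2*m := by omega
      have hf2 : loopB2 (2*m + 2*n + 4 - (p.2 - x).toNat) b' y (p.2 - 1) x (p.2 - x)
               = loopB2 (2*n + 2) b' y (p.2 - 1) x (p.2 - x) :=
        loopB2_fuel _ _ b' y (p.2 - 1) x (p.2 - x) n hlenb'
          (by have := min_le_right (((n:Int) - y).toNat) (2*n+1); omega)
          (by have := min_le_right (((n:Int) - y).toNat) (2*n+1); omega)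
      rw [hf2]
      cases hq : loopB2 (2*n + 2) b' y (p.2 - 1) x (p.2 - x) with
      | none => simp
      | some q => simp
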